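-- pv_equiv track=rewrite | github.com/ShahanurSharif/HRPythonCodingChallenges | queensAttack.py | createDiagonal
-- ===== SOURCE A (Python) =====
-- expanded_obstacles = []
--
-- def expand_obstacles(obstacle_matches, arr):
--     for om in obstacle_matches:
--         # bottom left
--         if om[0] > arr[0] and om[1] > arr[1]:
--             expanded_obstacles.append([arr[0], arr[1]])
--         # # 45-> 36->27 bottom right
--         if om[0] > arr[0] and om[1] < arr[1]:
--             expanded_obstacles.append([arr[0], arr[1]])
--         # 45->54->63->72 top left
--         if om[0] > arr[0] and om[1] < arr[1]:
--              expanded_obstacles.append([arr[0], arr[1]])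
--         # 45->56->67 top right
--         if om[0] < arr[0] and om[1] < arr[1]:
--             expanded_obstacles.append([arr[0], arr[1]])
--     return expanded_obstacles
--
-- def createDiagonal(n, queen, obstacle):
--     diagonal=[]
--     obstacle_matches=[]
--     for i in range(1, n + 1):
--         for j in range(1, n + 1):
--             if i-j == queen[0] - queen[1]:
--                 diagonal.append([i, j])
--                 if [i, j] in obstacle and  [i, j] not in obstacle_matches: obstacle_matches.append([i, j])
--             if i+j == queen[1] + queen[0]:
--                 diagonal.append([i, j])
--                 if [i, j] in obstacle and [i, j] not in obstacle_matches: obstacle_matches.append([i, j])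
--             if len(obstacle_matches):
--                 expand_obstacles(obstacle_matches, [i, j])
--     return diagonal
-- ===== SOURCE B (Python) =====
-- def createDiagonal(n, queen, obstacle):
--     # O(n): per row i there is at most one cell on each of the two diagonals; compute them directly.
--     # (Return-value equivalence only: A also mutates the module-level 'expanded_obstacles'; B does not.)
--     diagonal = []
--     for i in range(1, n + 1):
--         j1 = i - (queen[0] - queen[1])          # main diagonal: i - j == queen[0] - queen[1]
--         j2 = (queen[0] + queen[1]) - i          # anti-diagonal: i + j == queen[0] + queen[1]
--         in1 = 1 <= j1 <= n
--         in2 = 1 <= j2 <= n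
--         if in1 and in2:
--             if j1 <= j2:
--                 diagonal += [[i, j1], [i, j2]]
--             else:
--                 diagonal += [[i, j2], [i, j1]]
--         elif in1:
--             diagonal += [[i, j1]]
--         elif in2:
--             diagonal += [[i, j2]]
--     return diagonal
-- ===== Notes on version B (the rewrite author's own statement) =====
-- stated objective: faster
-- what changed: B replaces A's O(n^2) scan of every board cell (plus the quadratic obstacle-expansion side work) by computing directly, for each row i, the at most one column on each of the two diagonals, emitting them in A's nested-loop order; equivalence is about the return value only (A also appends to a module-level 'expanded_obstacles' list, B does not).
import Mathlib
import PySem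

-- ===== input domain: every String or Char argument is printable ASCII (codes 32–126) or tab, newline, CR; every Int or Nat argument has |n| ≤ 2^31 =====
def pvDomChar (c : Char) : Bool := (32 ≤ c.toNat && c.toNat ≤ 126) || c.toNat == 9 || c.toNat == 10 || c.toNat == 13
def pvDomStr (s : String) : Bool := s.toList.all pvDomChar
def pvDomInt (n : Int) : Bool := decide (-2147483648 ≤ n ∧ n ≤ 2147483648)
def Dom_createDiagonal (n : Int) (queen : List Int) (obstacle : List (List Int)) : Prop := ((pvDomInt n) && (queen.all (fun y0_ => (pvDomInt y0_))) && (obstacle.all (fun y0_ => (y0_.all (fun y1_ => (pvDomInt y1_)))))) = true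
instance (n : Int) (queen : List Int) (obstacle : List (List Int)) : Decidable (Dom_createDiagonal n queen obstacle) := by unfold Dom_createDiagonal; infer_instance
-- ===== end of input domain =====

-- B replaces A's O(n^2) scan of all board cells by directly computing, for each row i, the at
-- most one cell on each of the two diagonals (O(n)); return-value equivalence only: A also
-- appends to a module-level list 'expanded_obstacles' as a side effect, which B does not.

-- ===== PORT A =====
-- helper expand_obstacles: returns the updated 'expanded_obstacles' accumulator (global in Python)
def expandObstacles (obstacleMatches : List (List Int)) (arr : List Int) (acc : List (List Int)) : List (List Int) :=
  obstacleMatches.foldl (fun acc om =>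
    let a0 := PySem.List.pyGetD arr 0 0
    let a1 := PySem.List.pyGetD arr 1 0
    let o0 := PySem.List.pyGetD om 0 0
    let o1 := PySem.List.pyGetD om 1 0
    let acc := if o0 > a0 ∧ o1 > a1 then acc ++ [[a0, a1]] else acc
    let acc := if o0 > a0 ∧ o1 < a1 then acc ++ [[a0, a1]] else acc
    let acc := if o0 > a0 ∧ o1 < a1 then acc ++ [[a0, a1]] else acc
    let acc := if o0 < a0 ∧ o1 < a1 then acc ++ [[a0, a1]] else acc
    acc) acc

-- inner-loop body of A: state = (diagonal, obstacle_matches, expanded_obstacles)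
def pvStepA (queen : List Int) (obstacle : List (List Int)) (i : Int)
    (st : List (List Int) × List (List Int) × List (List Int)) (j : Int) :
    List (List Int) × List (List Int) × List (List Int) :=
  let q0 := PySem.List.pyGetD queen 0 0
  let q1 := PySem.List.pyGetD queen 1 0
  let d1 := if i - j = q0 - q1 then st.1 ++ [[i, j]] else st.1
  let m1 := if i - j = q0 - q1 ∧ [i, j] ∈ obstacle ∧ [i, j] ∉ st.2.1 then st.2.1 ++ [[i, j]] else st.2.1
  let d2 := if i + j = q1 + q0 then d1 ++ [[i, j]] else d1
  let m2 := if i + j = q1 + q0 ∧ [i, j] ∈ obstacle ∧ [i, j] ∉ m1 then m1 ++ [[i, j]] else m1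
  let e1 := if m2.length ≠ 0 then expandObstacles m2 [i, j] st.2.2 else st.2.2
  (d2, m2, e1)

def createDiagonal (n : Int) (queen : List Int) (obstacle : List (List Int)) : List (List Int) :=
  ((PySem.List.pyRange 1 (n + 1) 1).foldl (fun st i =>
    (PySem.List.pyRange 1 (n + 1) 1).foldl (pvStepA queen obstacle i) st)
    (([], [], []) : List (List Int) × List (List Int) × List (List Int))).1

-- ===== PORT B =====
-- per-row contribution of B (the body of B's single loop)
def pvRowB (n : Int) (queen : List Int) (i : Int) : List (List Int) :=
  let j1 := i - (PySem.List.pyGetD queen 0 0 - PySem.List.pyGetD queen 1 0)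
  let j2 := (PySem.List.pyGetD queen 0 0 + PySem.List.pyGetD queen 1 0) - i
  let in1 := 1 ≤ j1 ∧ j1 ≤ n
  let in2 := 1 ≤ j2 ∧ j2 ≤ n
  if in1 ∧ in2 then (if j1 ≤ j2 then [[i, j1], [i, j2]] else [[i, j2], [i, j1]])
  else if in1 then [[i, j1]]
  else if in2 then [[i, j2]]
  else []

def createDiagonal_alt (n : Int) (queen : List Int) (obstacle : List (List Int)) : List (List Int) :=
  (PySem.List.pyRange 1 (n + 1) 1).foldl (fun diagonal i => diagonal ++ pvRowB n queen i) []

-- ===== PRECONDITION & SPEC =====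
-- Pre_ excludes exactly the inputs where Python A raises IndexError: n ≥ 1 with fewer than two queen coordinates.
def Pre_createDiagonal (n : Int) (queen : List Int) (obstacle : List (List Int)) : Prop :=
  n ≤ 0 ∨ 2 ≤ queen.length
instance (n : Int) (queen : List Int) (obstacle : List (List Int)) : Decidable (Pre_createDiagonal n queen obstacle) := by unfold Pre_createDiagonal; infer_instance

def pvWitness_createDiagonal : Int × List Int × List (List Int) := (4, [2, 3], [[1, 2], [4, 5]])

def Spec_createDiagonal (n : Int) (queen : List Int) (obstacle : List (List Int)) (out : List (List Int)) : Prop := out = createDiagonal_alt n queen obstacle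
instance (n : Int) (queen : List Int) (obstacle : List (List Int)) (out : List (List Int)) : Decidable (Spec_createDiagonal n queen obstacle out) := by unfold Spec_createDiagonal; infer_instance

-- ===== CLAIM (what is proved, stated in full; the proofs are below) =====
def Claim_equal_createDiagonal : Prop := ∀ (n : Int) (queen : List Int) (obstacle : List (List Int)), Dom_createDiagonal n queen obstacle → Pre_createDiagonal n queen obstacle → Spec_createDiagonal n queen obstacle (createDiagonal n queen obstacle)

-- ===== LEMMAS AND PROOFS =====

-- the cells A appends at inner index j (row i): two-point support form
def pvCellA (queen : List Int) (i j : Int) : List (List Int) :=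
  (if i - j = PySem.List.pyGetD queen 0 0 - PySem.List.pyGetD queen 1 0 then [[i, j]] else []) ++
  (if i + j = PySem.List.pyGetD queen 1 0 + PySem.List.pyGetD queen 0 0 then [[i, j]] else [])

lemma pvStepA_fst (queen : List Int) (obstacle : List (List Int)) (i : Int)
    (st : List (List Int) × List (List Int) × List (List Int)) (j : Int) :
    (pvStepA queen obstacle i st j).1 = st.1 ++ pvCellA queen i j := by
  simp only [pvStepA, pvCellA]
  split_ifs <;> simp

lemma pvInner_fst (queen : List Int) (obstacle : List (List Int)) (i : Int)
    (l : List Int) (st : List (List Int) × List (List Int) × List (List Int)) :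
    (l.foldl (pvStepA queen obstacle i) st).1 = st.1 ++ l.flatMap (pvCellA queen i) := by
  induction l generalizing st with
  | nil => simp
  | cons j t ih =>
      simp only [List.foldl_cons, List.flatMap_cons, ih, pvStepA_fst, List.append_assoc]

lemma pvOuter_fst (n : Int) (queen : List Int) (obstacle : List (List Int))
    (l : List Int) (st : List (List Int) × List (List Int) × List (List Int)) :
    ((l.foldl (fun st i => (PySem.List.pyRange 1 (n + 1) 1).foldl (pvStepA queen obstacle i) st) st).1)
      = st.1 ++ l.flatMap (fun i => (PySem.List.pyRange 1 (n + 1) 1).flatMap (pvCellA queen i)) := by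
  induction l generalizing st with
  | nil => simp
  | cons i t ih =>
      simp only [List.foldl_cons, List.flatMap_cons, ih, pvInner_fst, List.append_assoc]

-- a flatMap of a function supported at two points, over a strictly increasing list
lemma pvFlatMapTwo {α : Type} (l : List Int) (hl : l.Pairwise (· < ·)) (j1 j2 : Int) (u v : List α) :
    l.flatMap (fun j => (if j = j1 then u else []) ++ (if j = j2 then v else [])) =
      if j1 ∈ l ∧ j2 ∈ l then (if j1 ≤ j2 then u ++ v else v ++ u)
      else if j1 ∈ l then u
      else if j2 ∈ l then v
      else [] := by
  induction l with
  | nil => simp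
  | cons x t ih =>
      have hxlt : ∀ y ∈ t, x < y := (List.pairwise_cons.mp hl).1
      have ht : t.Pairwise (· < ·) := (List.pairwise_cons.mp hl).2
      have h1t : x = j1 → j1 ∉ t := fun hx h => absurd (hxlt _ h) (by omega)
      have h2t : x = j2 → j2 ∉ t := fun hx h => absurd (hxlt _ h) (by omega)
      simp only [List.flatMap_cons, ih ht, List.mem_cons]
      by_cases hx1 : x = j1 <;> by_cases hx2 : x = j2
      · have e1 := h1t hx1; have e2 := h2t hx2
        subst hx1; subst hx2
        simp [e1]
      · have e1 := h1t hx1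
        subst hx1
        by_cases h2 : j2 ∈ t
        · simp [e1, hx2, Ne.symm hx2, h2, le_of_lt (hxlt _ h2)]
        · simp [e1, hx2, Ne.symm hx2, h2]
      · have e2 := h2t hx2
        subst hx2
        by_cases h1 : j1 ∈ t
        · simp [e2, hx1, Ne.symm hx1, h1, not_le_of_gt (hxlt _ h1)]
        · simp [e2, hx1, Ne.symm hx1, h1]
      · simp [hx1, hx2, Ne.symm hx1, Ne.symm hx2]

lemma pvCellA_eq (queen : List Int) (i j : Int) :
    pvCellA queen i j =
      (if j = i - (PySem.List.pyGetD queen 0 0 - PySem.List.pyGetD queen 1 0) then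
          [[i, i - (PySem.List.pyGetD queen 0 0 - PySem.List.pyGetD queen 1 0)]] else []) ++
      (if j = (PySem.List.pyGetD queen 0 0 + PySem.List.pyGetD queen 1 0) - i then
          [[i, (PySem.List.pyGetD queen 0 0 + PySem.List.pyGetD queen 1 0) - i]] else []) := by
  unfold pvCellA
  set q0 := PySem.List.pyGetD queen 0 0
  set q1 := PySem.List.pyGetD queen 1 0
  congr 1
  · by_cases h : j = i - (q0 - q1)
    · simp [h, show i - (i - (q0 - q1)) = q0 - q1 by ring]
    · simp [h, show ¬ (i - j = q0 - q1) by omega]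
  · by_cases h : j = (q0 + q1) - i
    · simp [h, show i + (q0 + q1 - i) = q1 + q0 by ring]
    · simp [h, show ¬ (i + j = q1 + q0) by omega]

lemma pvRow_eq (n : Int) (queen : List Int) (i : Int) :
    (PySem.List.pyRange 1 (n + 1) 1).flatMap (pvCellA queen i) = pvRowB n queen i := by
  rw [show pvCellA queen i = (fun j =>
          (if j = i - (PySem.List.pyGetD queen 0 0 - PySem.List.pyGetD queen 1 0) then
              [[i, i - (PySem.List.pyGetD queen 0 0 - PySem.List.pyGetD queen 1 0)]] else []) ++
          (if j = (PySem.List.pyGetD queen 0 0 + PySem.List.pyGetD queen 1 0) - i then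
              [[i, (PySem.List.pyGetD queen 0 0 + PySem.List.pyGetD queen 1 0) - i]] else []))
        from funext (pvCellA_eq queen i),
      pvFlatMapTwo _ (PySem.List.pairwise_lt_pyRange_one 1 (n + 1)) _ _ _ _]
  unfold pvRowB
  simp only [PySem.List.mem_pyRange_one]
  set q0 := PySem.List.pyGetD queen 0 0
  set q1 := PySem.List.pyGetD queen 1 0
  have h1 : (1 ≤ i - (q0 - q1) ∧ i - (q0 - q1) < n + 1) ↔ (1 ≤ i - (q0 - q1) ∧ i - (q0 - q1) ≤ n) := by omega
  have h2 : (1 ≤ (q0 + q1) - i ∧ (q0 + q1) - i < n + 1) ↔ (1 ≤ (q0 + q1) - i ∧ (q0 + q1) - i ≤ n) := by omega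
  simp only [h1, h2]
  split_ifs <;> simp

-- ===== VERDICT (by name: the statement is the Claim_ definition above) =====
theorem createDiagonal_spec : Claim_equal_createDiagonal := by
  intro n queen obstacle _ _
  unfold Spec_createDiagonal createDiagonal createDiagonal_alt
  rw [pvOuter_fst, PySem.List.foldl_append_eq_flatMap]
  simp only [List.nil_append, pvRow_eq]
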